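-- pv_equiv track=rewrite | github.com/KostasKv/Minesweeper-with-AI | MinesweeperAI/NoUnnecessaryGuessSolver.py | findBruteStartIndex
-- ===== SOURCE A (Python) =====
-- def findBruteStartIndex(frontier, brute):
--     ''' Inputs are an ordered collection of frontier tiles (non_brutes followed by brutes)
--         and an unordered collection of brute tiles.'''
--     i = None
--     for (i, tile) in enumerate(reversed(frontier)):
--         if tile not in brute:
--             break
--
--     if i is None or i == 0:
--         # No brute tile found
--         index = None
--     else:
--         index = len(frontier) - i
--
--     return index
-- ===== SOURCE B (Python) =====
-- def findBruteStartIndex(frontier, brute):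
--     brute_set = set(brute)
--     start = 0
--     for j, tile in enumerate(frontier):
--         if tile not in brute_set:
--             start = j + 1
--     return start if start < len(frontier) else None
-- ===== Notes on version B (the rewrite author's own statement) =====
-- stated objective: alternative
-- what changed: B replaces A's reversed enumerate-with-break loop over list membership by a single forward pass that tracks the position after the last non-brute tile, with one set built once for membership.
-- intended difference: On a nonempty frontier whose tiles are all in brute, A's loop never breaks so it returns 1 (or None for a one-tile frontier) instead of the true suffix start 0, which B returns. — e.g. on findBruteStartIndex([1, 2], [1, 2]): A returns some 1, B returns some 0
import Mathlib
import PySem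

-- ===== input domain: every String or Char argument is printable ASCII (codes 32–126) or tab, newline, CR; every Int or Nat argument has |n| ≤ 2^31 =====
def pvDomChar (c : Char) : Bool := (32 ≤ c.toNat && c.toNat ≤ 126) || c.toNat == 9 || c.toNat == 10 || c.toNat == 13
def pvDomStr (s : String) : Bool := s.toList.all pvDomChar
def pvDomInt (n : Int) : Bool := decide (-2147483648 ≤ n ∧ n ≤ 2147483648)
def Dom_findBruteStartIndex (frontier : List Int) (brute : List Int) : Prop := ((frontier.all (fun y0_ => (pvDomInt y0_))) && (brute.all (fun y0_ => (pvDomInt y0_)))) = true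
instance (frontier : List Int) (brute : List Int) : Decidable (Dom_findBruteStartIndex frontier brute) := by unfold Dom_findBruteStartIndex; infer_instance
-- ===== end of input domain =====

-- B replaces A's reversed enumerate-with-break loop by one forward pass tracking the
-- position after the last non-brute tile (objective: alternative decomposition).

-- ===== PORT A =====
-- for (i, tile) in enumerate(reversed(frontier)): if tile not in brute: break
-- 'i' is None before the loop, hence the Option Int accumulator.
def findBruteStartIndexLoopA (ys : List Int) (brute : List Int) (idx : Int) (i : Option Int) : Option Int :=
  match ys with
  | [] => i
  | t :: rest =>
    if t ∈ brute then findBruteStartIndexLoopA rest brute (idx + 1) (some idx)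
    else some idx   -- break (i was just set to idx)

def findBruteStartIndex (frontier : List Int) (brute : List Int) : Option Int :=
  match findBruteStartIndexLoopA frontier.reverse brute 0 none with
  | none => none                         -- i is None
  | some i => if i = 0 then none else some ((frontier.length : Int) - i)

-- ===== PORT B =====
-- for j, tile in enumerate(frontier): if tile not in brute_set: start = j + 1
def findBruteStartIndexLoopB (xs : List Int) (bs : List Int) (j : Int) (start : Int) : Int :=
  match xs with
  | [] => start
  | t :: rest => findBruteStartIndexLoopB rest bs (j + 1) (if t ∈ bs then start else j + 1)

def findBruteStartIndex_alt (frontier : List Int) (brute : List Int) : Option Int :=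
  let bs := PySem.Set.ofList brute
  let start := findBruteStartIndexLoopB frontier bs 0 0
  if start < (frontier.length : Int) then some start else none

-- ===== PRECONDITION & SPEC =====
-- On a nonempty frontier whose tiles are all in brute, A's loop never breaks so it
-- returns 1 (or None for a one-tile frontier) instead of the true suffix start 0,
-- which B returns.
def D_findBruteStartIndex (frontier : List Int) (brute : List Int) : Prop :=
  frontier ≠ [] ∧ ∀ x ∈ frontier, x ∈ brute
instance (frontier : List Int) (brute : List Int) : Decidable (D_findBruteStartIndex frontier brute) := by
  unfold D_findBruteStartIndex; infer_instance
def Spec_findBruteStartIndex (frontier : List Int) (brute : List Int) (out : Option Int) : Prop :=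
  ¬ D_findBruteStartIndex frontier brute → out = findBruteStartIndex_alt frontier brute
instance (frontier : List Int) (brute : List Int) (out : Option Int) : Decidable (Spec_findBruteStartIndex frontier brute out) := by
  unfold Spec_findBruteStartIndex; infer_instance

def pvDiffWitness_findBruteStartIndex : List Int × List Int := ([1, 2], [1, 2])
def pvDiffWitnessOut_findBruteStartIndex : (Option Int) × (Option Int) := (some 1, some 0)

-- ===== CLAIM (what is proved, stated in full; the proofs are below) =====
def Claim_unchanged_findBruteStartIndex : Prop := ∀ (frontier : List Int) (brute : List Int), Dom_findBruteStartIndex frontier brute → Spec_findBruteStartIndex frontier brute (findBruteStartIndex frontier brute)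
def Claim_changed_findBruteStartIndex : Prop := Dom_findBruteStartIndex (pvDiffWitness_findBruteStartIndex.1) (pvDiffWitness_findBruteStartIndex.2) ∧ D_findBruteStartIndex (pvDiffWitness_findBruteStartIndex.1) (pvDiffWitness_findBruteStartIndex.2) ∧ findBruteStartIndex (pvDiffWitness_findBruteStartIndex.1) (pvDiffWitness_findBruteStartIndex.2) = pvDiffWitnessOut_findBruteStartIndex.1 ∧ findBruteStartIndex_alt (pvDiffWitness_findBruteStartIndex.1) (pvDiffWitness_findBruteStartIndex.2) = pvDiffWitnessOut_findBruteStartIndex.2 ∧ pvDiffWitnessOut_findBruteStartIndex.1 ≠ pvDiffWitnessOut_findBruteStartIndex.2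
def Claim_exact_findBruteStartIndex : Prop := ∀ (frontier : List Int) (brute : List Int), Dom_findBruteStartIndex frontier brute → D_findBruteStartIndex frontier brute → findBruteStartIndex frontier brute ≠ findBruteStartIndex_alt frontier brute

-- ===== LEMMAS AND PROOFS =====

theorem takeWhile_append_all {α : Type} (p : α → Bool) (l₁ l₂ : List α)
    (h : ∀ a ∈ l₁, p a = true) : (l₁ ++ l₂).takeWhile p = l₁ ++ l₂.takeWhile p := by
  induction l₁ with
  | nil => simp
  | cons a l ih =>
    simp only [List.cons_append, List.takeWhile_cons, h a (by simp)]
    simp [ih (fun b hb => h b (by simp [hb]))]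

theorem takeWhile_append_not_all {α : Type} (p : α → Bool) (l₁ l₂ : List α)
    (h : ∃ a ∈ l₁, p a = false) : (l₁ ++ l₂).takeWhile p = l₁.takeWhile p := by
  induction l₁ with
  | nil => simp at h
  | cons a l ih =>
    by_cases hpa : p a = true
    · simp only [List.cons_append, List.takeWhile_cons, hpa, if_true]
      obtain ⟨b, hb, hpb⟩ := h
      rcases List.mem_cons.mp hb with rfl | hb'
      · rw [hpa] at hpb; exact absurd hpb (by simp)
      · simp [ih ⟨b, hb', hpb⟩]
    · simp only [List.cons_append, List.takeWhile_cons]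
      simp only [Bool.not_eq_true] at hpa
      simp [hpa]

theorem loopA_char (ys brute : List Int) (idx : Int) (i0 : Option Int) :
    findBruteStartIndexLoopA ys brute idx i0 =
      if ∀ y ∈ ys, y ∈ brute then
        (if ys = [] then i0 else some (idx + (ys.length : Int) - 1))
      else some (idx + ((ys.takeWhile (fun t => decide (t ∈ brute))).length : Int)) := by
  induction ys generalizing idx i0 with
  | nil => simp [findBruteStartIndexLoopA]
  | cons t rest ih =>
    by_cases ht : t ∈ brute
    · rw [show findBruteStartIndexLoopA (t :: rest) brute idx i0 =
          findBruteStartIndexLoopA rest brute (idx + 1) (some idx) from by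
        simp [findBruteStartIndexLoopA, ht]]
      rw [ih]
      by_cases hall : ∀ y ∈ rest, y ∈ brute
      · rw [if_pos hall,
          if_pos (fun y hy => by rcases List.mem_cons.mp hy with rfl | h
                                 exacts [ht, hall y h]),
          if_neg (List.cons_ne_nil t rest)]
        cases rest with
        | nil => simp
        | cons b bs =>
          rw [if_neg (List.cons_ne_nil b bs)]
          simp only [List.length_cons, Option.some.injEq]
          push_cast; ring
      · rw [if_neg hall, if_neg (fun h => hall fun y hy => h y (List.mem_cons_of_mem t hy))]
        simp only [List.takeWhile_cons, ht, decide_true, if_true, List.length_cons,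
          Option.some.injEq]
        push_cast; ring
    · rw [show findBruteStartIndexLoopA (t :: rest) brute idx i0 = some idx from by
        simp [findBruteStartIndexLoopA, ht]]
      rw [if_neg (fun h => ht (h t (List.mem_cons_self)))]
      simp [ht]

theorem loopB_char (xs bs : List Int) (j s : Int) :
    findBruteStartIndexLoopB xs bs j s =
      if ∀ x ∈ xs, x ∈ bs then s
      else j + (xs.length : Int) - ((xs.reverse.takeWhile (fun t => decide (t ∈ bs))).length : Int) := by
  induction xs generalizing j s with
  | nil => simp [findBruteStartIndexLoopB]
  | cons t rest ih =>
    rw [show findBruteStartIndexLoopB (t :: rest) bs j s =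
        findBruteStartIndexLoopB rest bs (j + 1) (if t ∈ bs then s else j + 1) from rfl]
    rw [ih]
    by_cases hall : ∀ x ∈ rest, x ∈ bs
    · rw [if_pos hall]
      by_cases ht : t ∈ bs
      · rw [if_pos (fun y hy => by rcases List.mem_cons.mp hy with rfl | h
                                   exacts [ht, hall y h]),
          if_pos ht]
      · rw [if_neg ht, if_neg (fun h => ht (h t (List.mem_cons_self)))]
        have htw : ((t :: rest).reverse.takeWhile (fun t => decide (t ∈ bs))) = rest.reverse := by
          rw [List.reverse_cons, takeWhile_append_all _ _ _
            (fun a ha => by simp [hall a (by simpa using ha)])]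
          simp [ht]
        rw [htw]
        simp only [List.length_cons, List.length_reverse]
        push_cast; ring
    · rw [if_neg hall, if_neg (fun h => hall fun x hx => h x (List.mem_cons_of_mem t hx))]
      obtain ⟨a, hna⟩ := not_forall.mp hall
      rw [Classical.not_imp] at hna
      have htw : ((t :: rest).reverse.takeWhile (fun t => decide (t ∈ bs))) =
          rest.reverse.takeWhile (fun t => decide (t ∈ bs)) := by
        rw [List.reverse_cons, takeWhile_append_not_all _ _ _
          ⟨a, by simpa using hna.1, by simp [hna.2]⟩]
      rw [htw]
      simp only [List.length_cons]
      push_cast; ring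

-- ===== VERDICT (by name: the statement is the Claim_ definition above) =====
theorem findBruteStartIndex_spec : Claim_unchanged_findBruteStartIndex := by
  intro frontier brute _ hD
  unfold findBruteStartIndex findBruteStartIndex_alt
  simp only [loopA_char, loopB_char, PySem.Set.mem_ofList]
  by_cases hall : ∀ y ∈ frontier, y ∈ brute
  · cases frontier with
    | nil => simp
    | cons a l => exact absurd ⟨List.cons_ne_nil a l, hall⟩ hD
  · have hallr : ¬ ∀ y ∈ frontier.reverse, y ∈ brute := by
      simpa [List.mem_reverse] using hall
    rw [if_neg hallr, if_neg hall]
    have hk : (frontier.reverse.takeWhile (fun t => decide (t ∈ brute))).length ≤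
        frontier.length := by
      simpa using (List.takeWhile_sublist
        (p := fun t => decide (t ∈ brute)) (l := frontier.reverse)).length_le
    set k : Nat := (frontier.reverse.takeWhile (fun t => decide (t ∈ brute))).length with hkdef
    simp only []
    split_ifs with h1 h2
    · exact absurd h2 (by omega)
    · rfl
    · simp only [Option.some.injEq]; omega
    · exact absurd (by omega : (0:Int) + frontier.length - k < frontier.length) (by assumption)

theorem findBruteStartIndex_changed : Claim_changed_findBruteStartIndex := by
  unfold Claim_changed_findBruteStartIndex; decide

theorem findBruteStartIndex_tight : Claim_exact_findBruteStartIndex := by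
  intro frontier brute _ hD
  obtain ⟨hne, hall⟩ := hD
  unfold findBruteStartIndex findBruteStartIndex_alt
  simp only [loopA_char, loopB_char, PySem.Set.mem_ofList]
  rw [if_pos (fun y hy => hall y (List.mem_reverse.mp hy)), if_pos hall]
  rw [if_neg (by simpa using hne)]
  have hlen : 1 ≤ frontier.length := List.length_pos_iff.mpr hne
  split_ifs with h1 <;> simp_all
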